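-- pv_equiv track=rewrite | github.com/meta-introspector/monster | analyze_all_356_files.py | hecke_resonance
-- ===== SOURCE A (Python) =====
-- MONSTER_PRIMES = [2, 3, 5, 7, 11, 13, 17, 19, 23, 29, 31, 41, 47, 59, 71]
--
-- def hecke_resonance(value):
--     """Find Monster prime with highest divisibility"""
--     if value == 0:
--         return 1
--     resonances = {}
--     for p in MONSTER_PRIMES:
--         if value % p == 0:
--             count = 0
--             temp = abs(value)
--             while temp % p == 0:
--                 count += 1
--                 temp //= p
--             resonances[p] = count
--     return max(resonances.items(), key=lambda x: x[1])[0] if resonances else 1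
-- ===== SOURCE B (Python) =====
-- MONSTER_PRIMES = [2, 3, 5, 7, 11, 13, 17, 19, 23, 29, 31, 41, 47, 59, 71]
--
-- def hecke_resonance(value):
--     """Find Monster prime with highest divisibility"""
--     if value == 0:
--         return 1
--     temp = abs(value)
--     alive = [p for p in MONSTER_PRIMES if temp % p == 0]
--     if not alive:
--         return 1
--     while True:
--         for p in alive:
--             temp //= p
--         nxt = [p for p in alive if temp % p == 0]
--         if not nxt:
--             return alive[0]
--         alive = nxt
-- ===== Notes on version B (the rewrite author's own statement) =====
-- stated objective: alternative
-- what changed: Instead of counting each prime's exponent separately and taking a dict max, B runs a round-based sieve: each round it divides temp by every still-dividing Monster prime simultaneously and keeps the list of survivors; the first prime alive in the final round (the one with the largest exponent) is returned.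
import Mathlib
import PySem

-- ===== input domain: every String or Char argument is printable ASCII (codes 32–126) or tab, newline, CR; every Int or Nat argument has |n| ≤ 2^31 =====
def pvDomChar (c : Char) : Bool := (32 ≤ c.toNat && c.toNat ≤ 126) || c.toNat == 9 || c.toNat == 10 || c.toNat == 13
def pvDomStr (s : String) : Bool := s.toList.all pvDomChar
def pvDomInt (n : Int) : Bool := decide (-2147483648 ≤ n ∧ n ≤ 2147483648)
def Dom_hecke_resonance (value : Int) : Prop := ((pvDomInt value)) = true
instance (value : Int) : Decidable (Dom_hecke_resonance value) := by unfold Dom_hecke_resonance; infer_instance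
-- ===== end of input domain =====

-- B replaces A's per-prime exponent loops + dict + max-by-exponent with a round-based
-- sieve: each round divides out every still-dividing prime simultaneously, and the first
-- prime alive in the last round is the answer (objective: alternative algorithm).

def MONSTER_PRIMES : List Int := [2, 3, 5, 7, 11, 13, 17, 19, 23, 29, 31, 41, 47, 59, 71]

-- ===== PORT A =====
-- A's inner while loop: `while temp % p == 0: count += 1; temp //= p`.
-- The guards `1 < p ∧ 0 < temp` only make the recursion total; on every reachable
-- call (p a Monster prime, temp = |value| > 0) they hold.
def heckeWhile (p temp count : Int) : Int :=
  if h : 1 < p ∧ 0 < temp ∧ PySem.Int.mod temp p = 0 then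
    heckeWhile p (PySem.Int.floordiv temp p) (count + 1)
  else count
termination_by temp.toNat
decreasing_by
  rcases h with ⟨hp, ht, _⟩
  have h1 : PySem.Int.floordiv temp p < temp :=
    (PySem.Int.floordiv_lt_iff_lt_mul (by omega)).mpr (by nlinarith)
  omega

def hecke_resonance (value : Int) : Int :=
  if value = 0 then 1
  else
    let resonances : PySem.Dict Int Int :=
      MONSTER_PRIMES.foldl (fun d p =>
        if PySem.Int.mod value p = 0 then d.insert p (heckeWhile p |value| 0) else d)
        PySem.Dict.empty
    match PySem.List.max? resonances.items (fun x => x.2) with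
    | some m => m.1
    | none => 1

-- ===== PORT B =====
-- B's inner `for p in alive: temp //= p` round, as a fold over the alive list.
def stripRound (t : Int) (alive : List Int) : Int :=
  alive.foldl (fun s p => PySem.Int.floordiv s p) t

-- Termination facts for heckeRounds (cited by name in decreasing_by).
theorem stripRound_nonneg_le (alive : List Int) : ∀ t : Int, 0 ≤ t →
    (∀ p ∈ alive, 1 < p) → 0 ≤ stripRound t alive ∧ stripRound t alive ≤ t := by
  induction alive with
  | nil => intro t ht _; exact ⟨ht, le_rfl⟩
  | cons p ps ih =>
    intro t ht hp
    have hp1 : 1 < p := hp p (List.mem_cons_self ..)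
    have hfd : PySem.Int.floordiv t p = t / p :=
      PySem.Int.floordiv_eq_ediv_of_pos (by omega)
    have h0 : 0 ≤ t / p := Int.ediv_nonneg ht (by omega)
    have h1 : t / p ≤ t := Int.ediv_le_self _ ht
    obtain ⟨g1, g2⟩ := ih (t / p) h0 (fun q hq => hp q (List.mem_cons_of_mem _ hq))
    refine ⟨?_, ?_⟩
    · simpa [stripRound, hfd] using g1
    · have : stripRound t (p :: ps) = stripRound (t / p) ps := by
        simp [stripRound, hfd]
      omega

theorem stripRound_lt (t : Int) (alive : List Int) (ht : 0 < t) (hne : alive ≠ [])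
    (hp : ∀ p ∈ alive, 1 < p ∧ PySem.Int.mod t p = 0) :
    0 ≤ stripRound t alive ∧ stripRound t alive < t := by
  cases alive with
  | nil => exact absurd rfl hne
  | cons p ps =>
    obtain ⟨hp1, hm⟩ := hp p (List.mem_cons_self ..)
    have hdvd : p ∣ t := (PySem.Int.mod_eq_zero_iff_dvd t p).mp hm
    have hfd : PySem.Int.floordiv t p = t / p :=
      PySem.Int.floordiv_eq_ediv_of_pos (by omega)
    have hmul : t / p * p = t := Int.ediv_mul_cancel hdvd
    have hlt : t / p < t := by nlinarith
    have h0 : 0 ≤ t / p := Int.ediv_nonneg (by omega) (by omega)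
    obtain ⟨g1, g2⟩ := stripRound_nonneg_le ps (t / p) h0
      (fun q hq => (hp q (List.mem_cons_of_mem _ hq)).1)
    have heq : stripRound t (p :: ps) = stripRound (t / p) ps := by
      simp [stripRound, hfd]
    omega

-- B's `while True` loop; state = (temp, alive).  The guard only makes the recursion
-- total: on every reachable call alive is nonempty and all its primes divide temp.
def heckeRounds (t : Int) (alive : List Int) : Int :=
  if h : alive ≠ [] ∧ 0 < t ∧ ∀ p ∈ alive, 1 < p ∧ PySem.Int.mod t p = 0 then
    let t' := stripRound t alive
    let nxt := alive.filter (fun p => decide (PySem.Int.mod t' p = 0))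
    if nxt = [] then alive.headD 1
    else heckeRounds t' nxt
  else alive.headD 1
termination_by t.toNat
decreasing_by
  rcases h with ⟨hne, ht, hp⟩
  obtain ⟨g1, g2⟩ := stripRound_lt t alive ht hne hp
  omega

def hecke_resonance_alt (value : Int) : Int :=
  if value = 0 then 1
  else
    let temp := |value|
    let alive := MONSTER_PRIMES.filter (fun p => decide (PySem.Int.mod temp p = 0))
    if alive = [] then 1
    else heckeRounds temp alive

-- ===== PRECONDITION & SPEC =====
def Spec_hecke_resonance (value : Int) (out : Int) : Prop := out = hecke_resonance_alt value
instance (value : Int) (out : Int) : Decidable (Spec_hecke_resonance value out) := by unfold Spec_hecke_resonance; infer_instance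

-- ===== CLAIM (what is proved, stated in full; the proofs are below) =====
def Claim_equal_hecke_resonance : Prop := ∀ (value : Int), Dom_hecke_resonance value → Spec_hecke_resonance value (hecke_resonance value)

-- ===== LEMMAS AND PROOFS =====

-- The p-adic exponent, via Mathlib's factorization on natAbs.
def Eexp (p t : Int) : Nat := t.natAbs.factorization p.natAbs

-- First element of the list attaining the maximal key (1 on the empty list).
def fmax (f : Int → Nat) : List Int → Int
  | [] => 1
  | p :: rest => if ∀ q ∈ rest, f q ≤ f p then p else fmax f rest

theorem monster_facts : ∀ p ∈ MONSTER_PRIMES, 1 < p ∧ Nat.Prime p.natAbs := by decide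

theorem monster_nodup : MONSTER_PRIMES.Nodup := by decide

-- A's while loop computes count + e where e is characterised by divisibility.
theorem heckeWhile_spec (p : Int) (hp : 1 < p) :
    ∀ (n : Nat) (t : Int), t.toNat ≤ n → 0 < t → ∀ c : Int,
    ∃ e : Nat, heckeWhile p t c = c + e ∧ p ^ e ∣ t ∧ ¬ p ^ (e + 1) ∣ t := by
  intro n
  induction n with
  | zero => intro t hle ht c; omega
  | succ n ih =>
    intro t hle ht c
    by_cases hm : PySem.Int.mod t p = 0
    · have hdvd : p ∣ t := (PySem.Int.mod_eq_zero_iff_dvd t p).mp hm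
      have hfd : PySem.Int.floordiv t p = t / p :=
        PySem.Int.floordiv_eq_ediv_of_pos (by omega)
      have heq : t / p * p = t := Int.ediv_mul_cancel hdvd
      have ht' : 0 < t / p := by nlinarith
      have hlt : t / p < t := by nlinarith
      obtain ⟨e', h1, h2, h3⟩ := ih (t / p) (by omega) ht' (c + 1)
      refine ⟨e' + 1, ?_, ?_, ?_⟩
      · rw [heckeWhile, dif_pos ⟨hp, ht, hm⟩, hfd, h1]
        push_cast; ring
      · rw [pow_succ]
        have := mul_dvd_mul_right h2 p
        rwa [heq] at this
      · intro hcon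
        rw [← heq, pow_succ] at hcon
        exact h3 ((mul_dvd_mul_iff_right (by omega : p ≠ 0)).mp hcon)
    · refine ⟨0, ?_, by simp, ?_⟩
      · rw [heckeWhile, dif_neg (by intro ⟨_, _, h⟩; exact hm h)]
        simp
      · simpa using fun h => hm ((PySem.Int.mod_eq_zero_iff_dvd t p).mpr h)

-- Bridge: Int power divisibility into natAbs, for 0 ≤ p.
theorem pow_dvd_iff_natAbs (p t : Int) (k : Nat) :
    p ^ k ∣ t ↔ p.natAbs ^ k ∣ t.natAbs := by
  rw [← Int.natAbs_dvd_natAbs, Int.natAbs_pow]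

theorem dvd_iff_E (q t : Int) (hq : q ∈ MONSTER_PRIMES) (ht : t ≠ 0) :
    q ∣ t ↔ 1 ≤ Eexp q t := by
  obtain ⟨hq1, hqp⟩ := monster_facts q hq
  have h := (pow_dvd_iff_natAbs q t 1)
  rw [pow_one, pow_one] at h
  rw [h, Eexp]
  have := hqp.pow_dvd_iff_le_factorization (n := t.natAbs) (k := 1)
    (by simpa using ht)
  rw [← this, pow_one]

theorem heckeWhile_eq_E (p value : Int) (hp : p ∈ MONSTER_PRIMES) (hv : value ≠ 0) :
    heckeWhile p |value| 0 = (Eexp p value : Int) := by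
  obtain ⟨hp1, hpp⟩ := monster_facts p hp
  obtain ⟨e, h1, h2, h3⟩ :=
    heckeWhile_spec p hp1 |value|.toNat |value| le_rfl (abs_pos.mpr hv) 0
  have habs : |value|.natAbs = value.natAbs := Int.natAbs_abs value
  rw [pow_dvd_iff_natAbs, habs] at h2 h3
  have hne : value.natAbs ≠ 0 := by simpa using hv
  have he2 : e ≤ Eexp p value := by
    rw [Eexp]; exact (hpp.pow_dvd_iff_le_factorization hne).mp h2
  have he3 : ¬ (e + 1 ≤ Eexp p value) := by
    rw [Eexp]; exact fun hc' => h3 ((hpp.pow_dvd_iff_le_factorization hne).mpr hc')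
  have : e = Eexp p value := by omega
  rw [h1, this]; ring

-- natAbs injectivity on the positive Monster primes.
theorem monster_inj (p q : Int) (hp : p ∈ MONSTER_PRIMES) (hq : q ∈ MONSTER_PRIMES)
    (h : p.natAbs = q.natAbs) : p = q := by
  have h1 : (1 : Int) < p := (monster_facts p hp).1
  have h2 : (1 : Int) < q := (monster_facts q hq).1
  have := Int.natAbs_of_nonneg (by omega : (0:Int) ≤ p)
  have := Int.natAbs_of_nonneg (by omega : (0:Int) ≤ q)
  omega

-- ---------- A-side characterisation ----------

theorem items_fold (value : Int) : ∀ (ps : List Int) (d : PySem.Dict Int Int),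
    ps.Nodup → (∀ q ∈ ps, d.contains q = false) →
    (ps.foldl (fun d p =>
        if PySem.Int.mod value p = 0 then d.insert p (heckeWhile p |value| 0) else d) d).items
      = d.items ++ (ps.filter (fun p => decide (PySem.Int.mod value p = 0))).map
          (fun p => (p, heckeWhile p |value| 0)) := by
  intro ps
  induction ps with
  | nil => intro d _ _; simp
  | cons p rest ih =>
    intro d hnd hcont
    have hnd' := List.nodup_cons.mp hnd
    simp only [List.foldl_cons]
    by_cases hm : PySem.Int.mod value p = 0
    · rw [if_pos hm]
      have hitems : (d.insert p (heckeWhile p |value| 0)).items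
          = d.items ++ [(p, heckeWhile p |value| 0)] :=
        PySem.Dict.items_insert_of_not_contains d _ (hcont p (List.mem_cons_self ..))
      rw [ih _ hnd'.2 (fun q hq => by
        rw [PySem.Dict.contains_insert]
        have hqp : q ≠ p := by rintro rfl; exact hnd'.1 hq
        simp [hqp, hcont q (List.mem_cons_of_mem _ hq)]), hitems,
        List.filter_cons_of_pos (by simpa using hm)]
      simp
    · rw [if_neg hm, ih _ hnd'.2 (fun q hq => hcont q (List.mem_cons_of_mem _ hq)),
        List.filter_cons_of_neg (by simpa using hm)]

theorem max?_cons2 (m y : Int × Int) (l : List (Int × Int)) :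
    PySem.List.max? (m :: y :: l) (fun x => x.2)
      = PySem.List.max? ((if m.2 < y.2 then y else m) :: l) (fun x => x.2) := by
  by_cases h : m.2 < y.2
  · simp only [PySem.List.max?, List.foldl_cons, if_pos h]
  · simp only [PySem.List.max?, List.foldl_cons, if_neg h]

theorem fmax_cons_lt (f : Int → Nat) (a p : Int) (rest : List Int) (h : f a < f p) :
    fmax f (a :: p :: rest) = fmax f (p :: rest) := by
  rw [fmax, if_neg (by push_neg; exact ⟨p, List.mem_cons_self .., by omega⟩)]

theorem fmax_cons_ge (f : Int → Nat) (a p : Int) (rest : List Int) (h : f p ≤ f a) :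
    fmax f (a :: p :: rest) = fmax f (a :: rest) := by
  by_cases hall : ∀ q ∈ rest, f q ≤ f a
  · rw [fmax, if_pos (by
      intro q hq
      rcases List.mem_cons.mp hq with rfl | hq
      · exact h
      · exact hall q hq)]
    rw [fmax, if_pos hall]
  · push_neg at hall
    obtain ⟨w, hw, hwgt⟩ := hall
    rw [fmax, if_neg (by
      push_neg
      exact ⟨w, List.mem_cons_of_mem _ hw, hwgt⟩)]
    conv_rhs => rw [fmax]
    rw [if_neg (by push_neg; exact ⟨w, hw, hwgt⟩)]
    rw [fmax, if_neg (by
      push_neg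
      exact ⟨w, hw, by omega⟩)]

theorem max?_map_cons (f : Int → Nat) : ∀ (ps : List Int) (a : Int),
    PySem.List.max? ((a :: ps).map (fun p => (p, (f p : Int)))) (fun x => x.2)
      = some (fmax f (a :: ps), (f (fmax f (a :: ps)) : Int)) := by
  intro ps
  induction ps with
  | nil =>
    intro a
    rw [fmax, if_pos (by intro q hq; cases hq)]
    rfl
  | cons p rest ih =>
    intro a
    rw [List.map_cons, List.map_cons, max?_cons2]
    by_cases h : f a < f p
    · have hcond : ((a, (f a : Int)) : Int × Int).2 < ((p, (f p : Int)) : Int × Int).2 := by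
        show ((f a : Int)) < ((f p : Int))
        exact_mod_cast h
      rw [if_pos hcond]
      have hih := ih p
      rw [List.map_cons] at hih
      rw [hih, fmax_cons_lt f a p rest h]
    · have hcond : ¬ ((a, (f a : Int)) : Int × Int).2 < ((p, (f p : Int)) : Int × Int).2 := by
        show ¬ ((f a : Int)) < ((f p : Int))
        exact fun hc => h (by exact_mod_cast hc)
      rw [if_neg hcond]
      have hih := ih a
      rw [List.map_cons] at hih
      rw [hih, fmax_cons_ge f a p rest (not_lt.mp h)]

theorem max?_map (f : Int → Nat) (ps : List Int) (hne : ps ≠ []) :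
    PySem.List.max? (ps.map (fun p => (p, (f p : Int)))) (fun x => x.2)
      = some (fmax f ps, (f (fmax f ps) : Int)) := by
  cases ps with
  | nil => exact absurd rfl hne
  | cons a rest => exact max?_map_cons f rest a

-- ---------- fmax combinatorics ----------

theorem fmax_congr (f g : Int → Nat) : ∀ l : List Int,
    (∀ x ∈ l, ∀ y ∈ l, (f x ≤ f y ↔ g x ≤ g y)) → fmax f l = fmax g l := by
  intro l
  induction l with
  | nil => intro _; rfl
  | cons p rest ih =>
    intro h
    have hc : (∀ q ∈ rest, f q ≤ f p) ↔ (∀ q ∈ rest, g q ≤ g p) := by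
      constructor
      · intro hf q hq
        exact (h q (List.mem_cons_of_mem _ hq) p (List.mem_cons_self ..)).mp (hf q hq)
      · intro hg q hq
        exact (h q (List.mem_cons_of_mem _ hq) p (List.mem_cons_self ..)).mpr (hg q hq)
    by_cases hall : ∀ q ∈ rest, f q ≤ f p
    · rw [fmax, if_pos hall, fmax, if_pos (hc.mp hall)]
    · rw [fmax, if_neg hall, fmax, if_neg (fun hg => hall (hc.mpr hg))]
      exact ih (fun x hx y hy =>
        h x (List.mem_cons_of_mem _ hx) y (List.mem_cons_of_mem _ hy))

theorem fmax_filter (f : Int → Nat) (P : Int → Bool) : ∀ l : List Int,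
    l.filter P ≠ [] →
    (∀ x ∈ l, P x = false → ∀ y ∈ l, P y = true → f x < f y) →
    fmax f (l.filter P) = fmax f l := by
  intro l
  induction l with
  | nil => intro h _; simp at h
  | cons p rest ih =>
    intro hne hlt
    by_cases hP : P p = true
    · rw [List.filter_cons_of_pos hP] at hne ⊢
      have hc : (∀ q ∈ rest.filter P, f q ≤ f p) ↔ (∀ q ∈ rest, f q ≤ f p) := by
        constructor
        · intro hf q hq
          by_cases hPq : P q = true
          · exact hf q (List.mem_filter.mpr ⟨hq, hPq⟩)
          · have := hlt q (List.mem_cons_of_mem _ hq)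
              (by simpa using hPq) p (List.mem_cons_self ..) hP
            omega
        · intro hf q hq
          exact hf q (List.mem_filter.mp hq).1
      by_cases hall : ∀ q ∈ rest.filter P, f q ≤ f p
      · rw [fmax, if_pos hall, fmax, if_pos (hc.mp hall)]
      · rw [fmax, if_neg hall, fmax, if_neg (fun h => hall (hc.mpr h))]
        have hfne : rest.filter P ≠ [] := by
          push_neg at hall
          obtain ⟨w, hw, _⟩ := hall
          intro hcon; rw [hcon] at hw; cases hw
        exact ih hfne (fun x hx hPx y hy hPy =>
          hlt x (List.mem_cons_of_mem _ hx) hPx y (List.mem_cons_of_mem _ hy) hPy)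
    · have hPf : P p = false := by simpa using hP
      rw [List.filter_cons_of_neg (by simp [hPf])] at hne ⊢
      obtain ⟨w, hwmem⟩ := List.exists_mem_of_ne_nil _ hne
      have hwrest := (List.mem_filter.mp hwmem).1
      have hwP := (List.mem_filter.mp hwmem).2
      have hplt : f p < f w :=
        hlt p (List.mem_cons_self ..) hPf w (List.mem_cons_of_mem _ hwrest) hwP
      rw [fmax, if_neg (by push_neg; exact ⟨w, hwrest, by omega⟩)]
      exact ih hne (fun x hx hPx y hy hPy =>
        hlt x (List.mem_cons_of_mem _ hx) hPx y (List.mem_cons_of_mem _ hy) hPy)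

-- ---------- B-side: one round of simultaneous division ----------

theorem stripRound_spec : ∀ (alive : List Int) (t : Int), 0 < t → alive.Nodup →
    (∀ p ∈ alive, p ∈ MONSTER_PRIMES) → (∀ p ∈ alive, p ∣ t) →
    0 < stripRound t alive ∧
    (∀ q ∈ MONSTER_PRIMES,
      Eexp q (stripRound t alive) = Eexp q t - (if q ∈ alive then 1 else 0)) := by
  intro alive
  induction alive with
  | nil =>
    intro t ht _ _ _
    refine ⟨ht, fun q _ => by simp [stripRound]⟩
  | cons p ps ih =>
    intro t ht hnd hmem hdvd
    have hpM : p ∈ MONSTER_PRIMES := hmem p (List.mem_cons_self ..)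
    obtain ⟨hp1, hpp⟩ := monster_facts p hpM
    have hnd' := List.nodup_cons.mp hnd
    have hpd : p ∣ t := hdvd p (List.mem_cons_self ..)
    have hfd : PySem.Int.floordiv t p = t / p :=
      PySem.Int.floordiv_eq_ediv_of_pos (by omega)
    have hmul : t / p * p = t := Int.ediv_mul_cancel hpd
    have ht1 : 0 < t / p := by nlinarith
    -- natAbs arithmetic for the division step
    have hnat : t.natAbs = (t / p).natAbs * p.natAbs := by
      rw [← Int.natAbs_mul, hmul]
    have hdn : p.natAbs ∣ t.natAbs := ⟨(t / p).natAbs, by rw [hnat]; exact Nat.mul_comm _ _⟩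
    have hdivn : (t / p).natAbs = t.natAbs / p.natAbs :=
      (Nat.div_eq_of_eq_mul_left (by have := hpp.pos; omega) hnat).symm
    have hEstep : ∀ q ∈ MONSTER_PRIMES,
        Eexp q (t / p) = Eexp q t - (if q = p then 1 else 0) := by
      intro q hqM
      have hfac := Nat.factorization_div hdn
      have : Eexp q (t / p) = Eexp q t - p.natAbs.factorization q.natAbs := by
        rw [Eexp, Eexp, hdivn, hfac]; rfl
      rw [this, hpp.factorization, Finsupp.single_apply]
      congr 1
      by_cases hqp : q = p
      · rw [if_pos hqp, if_pos (by rw [hqp])]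
      · rw [if_neg hqp, if_neg (fun hc => hqp (monster_inj q p hqM hpM hc.symm))]
    -- divisibility of the remaining primes by t / p
    have hdvd' : ∀ q ∈ ps, q ∣ t / p := by
      intro q hq
      have hqM := hmem q (List.mem_cons_of_mem _ hq)
      have hqp : q ≠ p := by rintro rfl; exact hnd'.1 hq
      have h1 : 1 ≤ Eexp q t :=
        (dvd_iff_E q t hqM (by omega)).mp (hdvd q (List.mem_cons_of_mem _ hq))
      have h2 : Eexp q (t / p) = Eexp q t := by
        rw [hEstep q hqM, if_neg hqp]; omega
      exact (dvd_iff_E q (t / p) hqM (by omega)).mpr (by omega)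
    obtain ⟨g1, g2⟩ := ih (t / p) ht1 hnd'.2
      (fun q hq => hmem q (List.mem_cons_of_mem _ hq)) hdvd'
    have heq : stripRound t (p :: ps) = stripRound (t / p) ps := by
      simp [stripRound, hfd]
    refine ⟨by omega, ?_⟩
    intro q hqM
    rw [heq, g2 q hqM, hEstep q hqM]
    have hE1 : q ∈ p :: ps → 1 ≤ Eexp q t := fun hq =>
      (dvd_iff_E q t hqM (by omega)).mp (hdvd q hq)
    by_cases hqp : q = p
    · subst hqp
      have hnp : q ∉ ps := hnd'.1
      rw [if_pos rfl, if_neg hnp, if_pos (List.mem_cons_self ..)]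
      omega
    · rw [if_neg hqp]
      by_cases hqps : q ∈ ps
      · rw [if_pos hqps, if_pos (List.mem_cons_of_mem _ hqps)]
        omega
      · rw [if_neg hqps, if_neg (by
          intro hc
          rcases List.mem_cons.mp hc with rfl | hc
          · exact hqp rfl
          · exact hqps hc)]
        omega

-- ---------- B-side: the round loop computes the first argmax ----------

theorem heckeRounds_eq : ∀ (n : Nat) (t : Int) (alive : List Int), t.toNat ≤ n →
    0 < t → alive ≠ [] → alive.Nodup → (∀ p ∈ alive, p ∈ MONSTER_PRIMES) →
    (∀ p ∈ alive, PySem.Int.mod t p = 0) →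
    heckeRounds t alive = fmax (fun p => Eexp p t) alive := by
  intro n
  induction n with
  | zero =>
    intro t alive hle ht hne _ hmem hmod
    omega
  | succ n ih =>
    intro t alive hle ht hne hnd hmem hmod
    have hguard : alive ≠ [] ∧ 0 < t ∧ ∀ p ∈ alive, 1 < p ∧ PySem.Int.mod t p = 0 :=
      ⟨hne, ht, fun p hp => ⟨(monster_facts p (hmem p hp)).1, hmod p hp⟩⟩
    have hdvd : ∀ p ∈ alive, p ∣ t := fun p hp =>
      (PySem.Int.mod_eq_zero_iff_dvd t p).mp (hmod p hp)
    obtain ⟨ht', hE⟩ := stripRound_spec alive t ht hnd hmem hdvd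
    obtain ⟨hsr0, hsrlt⟩ := stripRound_lt t alive ht hne hguard.2.2
    set t' := stripRound t alive with ht'def
    have hE1 : ∀ p ∈ alive, 1 ≤ Eexp p t := fun p hp =>
      (dvd_iff_E p t (hmem p hp) (by omega)).mp (hdvd p hp)
    have hEa : ∀ p ∈ alive, Eexp p t' = Eexp p t - 1 := by
      intro p hp
      rw [hE p (hmem p hp), if_pos hp]
    have hmem' : ∀ p ∈ alive, (PySem.Int.mod t' p = 0 ↔ 2 ≤ Eexp p t) := by
      intro p hp
      rw [PySem.Int.mod_eq_zero_iff_dvd, dvd_iff_E p t' (hmem p hp) (by omega),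
        hEa p hp]
      have := hE1 p hp
      omega
    rw [heckeRounds, dif_pos hguard]
    simp only [← ht'def]
    by_cases hnxt : alive.filter (fun p => decide (PySem.Int.mod t' p = 0)) = []
    · rw [if_pos hnxt]
      -- every alive exponent is exactly 1, so the first alive prime is the argmax
      have hall1 : ∀ p ∈ alive, Eexp p t = 1 := by
        intro p hp
        have h2 : ¬ (2 ≤ Eexp p t) := by
          intro h2
          have : p ∈ alive.filter (fun p => decide (PySem.Int.mod t' p = 0)) :=
            List.mem_filter.mpr ⟨hp, by simpa using (hmem' p hp).mpr h2⟩
          rw [hnxt] at this; cases this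
        have := hE1 p hp
        omega
      cases alive with
      | nil => exact absurd rfl hne
      | cons a rest =>
        rw [fmax, if_pos (by
          intro q hq
          rw [hall1 q (List.mem_cons_of_mem _ hq), hall1 a (List.mem_cons_self ..)])]
        rfl
    · rw [if_neg hnxt]
      set nxt := alive.filter (fun p => decide (PySem.Int.mod t' p = 0)) with hnxtdef
      have hsub : ∀ p ∈ nxt, p ∈ alive := fun p hp => (List.mem_filter.mp hp).1
      have hrec := ih t' nxt (by omega) (by omega) hnxt (hnd.filter _)
        (fun p hp => hmem p (hsub p hp))
        (fun p hp => by simpa using (List.mem_filter.mp hp).2)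
      rw [hrec]
      have h2 : ∀ p ∈ nxt, 2 ≤ Eexp p t := fun p hp =>
        (hmem' p (hsub p hp)).mp (by simpa using (List.mem_filter.mp hp).2)
      calc fmax (fun p => Eexp p t') nxt
          = fmax (fun p => Eexp p t) nxt := by
            apply fmax_congr
            intro x hx y hy
            rw [hEa x (hsub x hx), hEa y (hsub y hy)]
            have := h2 x hx; have := h2 y hy
            omega
        _ = fmax (fun p => Eexp p t) alive := by
            apply fmax_filter _ _ alive (by rw [← hnxtdef]; exact hnxt)
            intro x hx hPx y hy hPy
            have hx1 := hE1 x hx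
            have hx2 : ¬ (2 ≤ Eexp x t) := fun h =>
              by simp [(hmem' x hx).mpr h] at hPx
            have hy2 : 2 ≤ Eexp y t := (hmem' y hy).mp (by simpa using hPy)
            omega

-- ---------- final characterisations ----------

theorem A_char (value : Int) (hv : value ≠ 0) :
    hecke_resonance value =
      (if MONSTER_PRIMES.filter (fun p => decide (PySem.Int.mod value p = 0)) = [] then 1
       else fmax (fun p => Eexp p value)
         (MONSTER_PRIMES.filter (fun p => decide (PySem.Int.mod value p = 0)))) := by
  rw [hecke_resonance, if_neg hv]
  have hitems := items_fold value MONSTER_PRIMES PySem.Dict.empty monster_nodup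
    (fun q _ => rfl)
  simp only [hitems]
  set l := MONSTER_PRIMES.filter (fun p => decide (PySem.Int.mod value p = 0)) with hl
  have hmapeq : l.map (fun p => (p, heckeWhile p |value| 0))
      = l.map (fun p => (p, (Eexp p value : Int))) := by
    apply List.map_congr_left
    intro p hp
    rw [heckeWhile_eq_E p value (List.mem_filter.mp (hl ▸ hp)).1 hv]
  by_cases hle : l = []
  · rw [if_pos hle, hle]
    rfl
  · rw [if_neg hle]
    have hd : (PySem.Dict.empty : PySem.Dict Int Int).items = [] := rfl
    rw [hd, List.nil_append, hmapeq, max?_map _ _ hle]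

theorem B_char (value : Int) (hv : value ≠ 0) :
    hecke_resonance_alt value =
      (if MONSTER_PRIMES.filter (fun p => decide (PySem.Int.mod value p = 0)) = [] then 1
       else fmax (fun p => Eexp p value)
         (MONSTER_PRIMES.filter (fun p => decide (PySem.Int.mod value p = 0)))) := by
  rw [hecke_resonance_alt, if_neg hv]
  have habs : 0 < |value| := abs_pos.mpr hv
  have hfe : MONSTER_PRIMES.filter (fun p => decide (PySem.Int.mod |value| p = 0))
      = MONSTER_PRIMES.filter (fun p => decide (PySem.Int.mod value p = 0)) := by
    apply List.filter_congr
    intro p _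
    simp only [decide_eq_decide, PySem.Int.mod_eq_zero_iff_dvd]
    exact dvd_abs p value
  simp only [hfe]
  set l := MONSTER_PRIMES.filter (fun p => decide (PySem.Int.mod value p = 0)) with hl
  by_cases hle : l = []
  · simp [hle]
  · rw [if_neg hle, if_neg hle]
    have hEabs : ∀ p, Eexp p |value| = Eexp p value := by
      intro p; rw [Eexp, Eexp, Int.natAbs_abs]
    rw [heckeRounds_eq |value|.toNat |value| l le_rfl habs hle
      (monster_nodup.filter _)
      (fun p hp => (List.mem_filter.mp (hl ▸ hp)).1)
      (fun p hp => by
        have := (List.mem_filter.mp (hl ▸ hp)).2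
        simp only [decide_eq_true_eq, PySem.Int.mod_eq_zero_iff_dvd] at this ⊢
        exact (dvd_abs p value).mpr this)]
    exact fmax_congr _ _ l (fun x _ y _ => by rw [hEabs x, hEabs y])

-- ===== VERDICT (by name: the statement is the Claim_ definition above) =====
theorem hecke_resonance_spec : Claim_equal_hecke_resonance := by
  intro value _
  unfold Spec_hecke_resonance
  by_cases hv : value = 0
  · subst hv; rfl
  · rw [A_char value hv, B_char value hv]
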